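-- pv_equiv track=rewrite | github.com/Jpjonas/Python-Practice | Práctica 2/Ejercicio 11b.py | multiplos
-- ===== SOURCE A (Python) =====
-- def multiplos(a,b):
--     """
--     Representación de los datos:
--     Representamos múltiplos como números
--
--     Signatura:
--     contaNumeros: int -> int -> int
--     Los parametros representan números y devuelve la cantidad de múltiplos
--
--     Declaracion de propósito:
--     La función calcula la cantidad de multiplos de un número menores que el otro
--
--     Ejemplos:
--     >>> multiplos(10,8)=3
--     >>> multiplos(64,50)=6
--     >>> multiplos(20,15)=5
--     """
--     c=0
--     x=1
--     while(x<=b):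
--         if(a%x==0):
--             c=c+1
--         x=x+1
--     return c
-- ===== SOURCE B (Python) =====
-- def multiplos(a, b):
--     if b <= 0:
--         return 0
--     n = abs(a)
--     if n == 0:
--         return b
--     c = 0
--     d = 1
--     while d * d <= n:
--         if n % d == 0:
--             if d <= b:
--                 c += 1
--             e = n // d
--             if e != d and e <= b:
--                 c += 1
--         d += 1
--     return c
-- ===== Notes on version B (the rewrite author's own statement) =====
-- stated objective: faster
-- what changed: B counts divisors of |a| by enumerating divisor pairs (d, |a|//d) only up to sqrt(|a|) (with a=0 and b<=0 handled directly), instead of A's trial loop over every x from 1 to b.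
import Mathlib
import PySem

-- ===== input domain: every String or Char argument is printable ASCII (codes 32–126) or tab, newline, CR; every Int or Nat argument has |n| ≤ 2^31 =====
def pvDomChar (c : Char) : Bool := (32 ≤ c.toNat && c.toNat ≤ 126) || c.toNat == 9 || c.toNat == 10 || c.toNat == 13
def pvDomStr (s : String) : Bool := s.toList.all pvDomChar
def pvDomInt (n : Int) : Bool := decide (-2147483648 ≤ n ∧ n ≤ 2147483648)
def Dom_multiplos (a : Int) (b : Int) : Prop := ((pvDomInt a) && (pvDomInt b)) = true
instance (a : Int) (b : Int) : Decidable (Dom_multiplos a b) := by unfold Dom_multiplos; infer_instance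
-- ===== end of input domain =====

-- B replaces A's trial loop over every x in 1..b by enumeration of divisor pairs (d, |a|//d)
-- of |a| with d*d ≤ |a| (a = 0 and b ≤ 0 handled directly); objective: faster.

-- ===== PORT A =====
-- while x <= b: if a % x == 0: c += 1; x += 1
def multiplosLoop (a b x c : Int) : Int :=
  if x ≤ b then
    multiplosLoop a b (x + 1) (if PySem.Int.mod a x = 0 then c + 1 else c)
  else c
termination_by (b + 1 - x).toNat
decreasing_by omega

def multiplos (a : Int) (b : Int) : Int :=
  multiplosLoop a b 1 0

-- ===== PORT B =====
-- while d*d <= n: if n % d == 0: (count d if d<=b; count e=n//d if e!=d and e<=b); d += 1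
def multiplosAltLoop (n b d c : Int) : Int :=
  if h : d * d ≤ n then
    multiplosAltLoop n b (d + 1)
      (if PySem.Int.mod n d = 0 then
        (let c1 := if d ≤ b then c + 1 else c
         let e := PySem.Int.floordiv n d
         if e ≠ d ∧ e ≤ b then c1 + 1 else c1)
       else c)
  else c
termination_by (n + 1 - d).toNat
decreasing_by
  have hdn : d ≤ n := by nlinarith [mul_self_nonneg d, mul_self_nonneg (d - 1)]
  omega

def multiplos_alt (a : Int) (b : Int) : Int :=
  if b ≤ 0 then 0
  else
    let n := |a|
    if n = 0 then b
    else multiplosAltLoop n b 1 0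

-- ===== PRECONDITION & SPEC =====
def Spec_multiplos (a : Int) (b : Int) (out : Int) : Prop := out = multiplos_alt a b
instance (a : Int) (b : Int) (out : Int) : Decidable (Spec_multiplos a b out) := by unfold Spec_multiplos; infer_instance

-- ===== CLAIM (what is proved, stated in full; the proofs are below) =====
def Claim_equal_multiplos : Prop := ∀ (a : Int) (b : Int), Dom_multiplos a b → Spec_multiplos a b (multiplos a b)

-- ===== LEMMAS AND PROOFS =====

-- set of divisors y of n with 1 ≤ y ≤ b that the alt loop has not yet counted at step d
noncomputable def pvR (n b d : Int) : Finset Int :=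
  (Finset.Icc 1 b).filter (fun y => y ∣ n ∧ d ≤ y ∧ d ≤ n / y)

lemma pvIcc_cons (x b : Int) (h : x ≤ b) :
    Finset.Icc x b = insert x (Finset.Icc (x + 1) b) := by
  ext y; simp only [Finset.mem_Icc, Finset.mem_insert]; omega

lemma pvCard_filter_step (P : Int → Prop) [DecidablePred P] (x b : Int) (h : x ≤ b) :
    ((Finset.Icc x b).filter P).card
      = (if P x then 1 else 0) + ((Finset.Icc (x + 1) b).filter P).card := by
  rw [pvIcc_cons x b h, Finset.filter_insert]
  split_ifs with hP
  · rw [Finset.card_insert_of_notMem]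
    · omega
    · simp [Finset.mem_filter, Finset.mem_Icc]
  · omega

lemma pvLoopA_eq (a b x c : Int) :
    multiplosLoop a b x c = c + (((Finset.Icc x b).filter (fun y => y ∣ a)).card : Int) := by
  fun_induction multiplosLoop a b x c with
  | case1 x c h ih =>
    simp only [dite_eq_ite] at ih ⊢
    rw [ih, pvCard_filter_step (fun y => y ∣ a) x b h]
    have hmod : PySem.Int.mod a x = 0 ↔ x ∣ a := PySem.Int.mod_eq_zero_iff_dvd a x
    by_cases hd : x ∣ a
    · simp only [if_pos hd, if_pos (hmod.mpr hd)]
      push_cast; ring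
    · have hm : ¬ PySem.Int.mod a x = 0 := fun h0 => hd (hmod.mp h0)
      simp only [if_neg hd, if_neg hm]
      push_cast; ring
  | case2 x c h =>
    have he : Finset.Icc x b = ∅ := Finset.Icc_eq_empty (by omega)
    simp [he]

lemma pvMultiplos_eq (a b : Int) :
    multiplos a b = (((Finset.Icc 1 b).filter (fun y => y ∣ a)).card : Int) := by
  simpa using pvLoopA_eq a b 1 0

-- basic fact: a positive divisor y of a positive n has positive cofactor n / y, and y * (n / y) = n
lemma pvCofactor (n y : Int) (hn : 1 ≤ n) (hy : 1 ≤ y) (hdvd : y ∣ n) :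
    y * (n / y) = n ∧ 1 ≤ n / y := by
  obtain ⟨k, hk⟩ := hdvd
  have hy0 : y ≠ 0 := by omega
  have hdiv : n / y = k := by rw [hk, Int.mul_ediv_cancel_left _ hy0]
  constructor
  · rw [hdiv, ← hk]
  · rw [hdiv]; nlinarith

lemma pvR_empty (n b d : Int) (hn : 1 ≤ n) (hd : 1 ≤ d) (h : ¬ d * d ≤ n) :
    pvR n b d = ∅ := by
  rw [Finset.eq_empty_iff_forall_notMem]
  intro y hy
  simp only [pvR, Finset.mem_filter, Finset.mem_Icc] at hy
  obtain ⟨⟨hy1, _⟩, hdvd, hdy, hde⟩ := hy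
  obtain ⟨hmul, he1⟩ := pvCofactor n y hn hy1 hdvd
  nlinarith

lemma pvR_step (n b d : Int) (hn : 1 ≤ n) (hd : 1 ≤ d) (hdd : d * d ≤ n) :
    ((pvR n b d).card : Int)
      = (pvR n b (d + 1)).card
        + ((if d ∣ n ∧ d ≤ b then 1 else 0)
           + (if d ∣ n ∧ n / d ≠ d ∧ n / d ≤ b then (1 : Int) else 0)) := by
  classical
  set E : Finset Int :=
    (Finset.Icc 1 b).filter (fun y => y ∣ n ∧ d ≤ y ∧ d ≤ n / y ∧ (y = d ∨ n / y = d)) with hE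
  have hsplit : pvR n b d = pvR n b (d + 1) ∪ E := by
    ext y
    simp only [pvR, hE, Finset.mem_union, Finset.mem_filter, Finset.mem_Icc]
    constructor
    · rintro ⟨hy, hdvd, h1, h2⟩
      by_cases hc : d + 1 ≤ y ∧ d + 1 ≤ n / y
      · exact Or.inl ⟨hy, hdvd, hc.1, hc.2⟩
      · exact Or.inr ⟨hy, hdvd, h1, h2, by omega⟩
    · rintro (⟨hy, hdvd, h1, h2⟩ | ⟨hy, hdvd, h1, h2, _⟩)
      · exact ⟨hy, hdvd, by omega, by omega⟩
      · exact ⟨hy, hdvd, h1, h2⟩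
  have hdisj : Disjoint (pvR n b (d + 1)) E := by
    rw [Finset.disjoint_left]
    intro y hy hyE
    simp only [pvR, hE, Finset.mem_filter, Finset.mem_Icc] at hy hyE
    omega
  have hcard : (pvR n b d).card = (pvR n b (d + 1)).card + E.card := by
    rw [hsplit, Finset.card_union_of_disjoint hdisj]
  rw [hcard]
  push_cast
  congr 1
  -- compute E.card by cases on d ∣ n
  by_cases hdvd : d ∣ n
  · have hd0 : d ≠ 0 := by omega
    obtain ⟨hmul, he1⟩ := pvCofactor n d hn hd hdvd
    set e : Int := n / d with hedef
    have hde : d ≤ e := by nlinarith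
    have hedvd : e ∣ n := ⟨d, by rw [← hmul]; ring⟩
    have hne0 : e ≠ 0 := by omega
    have hnee : n / e = d := by
      have hh : e * d = n := by rw [mul_comm]; exact hmul
      rw [← hh, Int.mul_ediv_cancel_left _ hne0]
    have hEeq : E = (if d ≤ b then ({d} : Finset Int) else ∅)
        ∪ (if e ≠ d ∧ e ≤ b then ({e} : Finset Int) else ∅) := by
      ext y
      simp only [hE, Finset.mem_filter, Finset.mem_Icc, Finset.mem_union]
      constructor
      · rintro ⟨⟨hy1, hy2⟩, hydvd, h1, h2, h3⟩
        rcases h3 with h3 | h3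
        · refine Or.inl ?_
          rw [if_pos (by omega : d ≤ b)]
          simp [h3]
        · have hmy : y * (n / y) = n := (pvCofactor n y hn hy1 hydvd).1
          rw [h3] at hmy
          have hh : e * d = n := by rw [mul_comm]; exact hmul
          have h0 : (y - e) * d = 0 := by
            calc (y - e) * d = y * d - e * d := by ring
              _ = 0 := by rw [hmy, hh]; ring
          have hyval : y = e := by
            rcases mul_eq_zero.mp h0 with h4 | h4 <;> omega
          rcases eq_or_ne e d with hyd | hyd
          · refine Or.inl ?_
            rw [if_pos (show d ≤ b by omega)]
            simp [hyval, hyd]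
          · refine Or.inr ?_
            rw [if_pos ⟨hyd, show e ≤ b by omega⟩]
            simp [hyval]
      · intro h
        rcases h with h | h
        · split_ifs at h with hb
          · simp only [Finset.mem_singleton] at h
            subst h
            exact ⟨⟨hd, hb⟩, hdvd, le_refl _, hde, Or.inl rfl⟩
          · simp at h
        · split_ifs at h with hb
          · simp only [Finset.mem_singleton] at h
            subst h
            exact ⟨⟨he1, hb.2⟩, hedvd, hde, by omega, Or.inr hnee⟩
          · simp at h
    rw [hEeq]
    by_cases hb1 : d ≤ b <;> by_cases hb2 : e ≠ d ∧ e ≤ b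
    · have hdne : (d : Int) ≠ e := fun hq => hb2.1 hq.symm
      rw [if_pos hb1, if_pos hb2, if_pos ⟨hdvd, hb1⟩, if_pos ⟨hdvd, hb2.1, hb2.2⟩]
      rw [Finset.singleton_union, Finset.card_insert_of_notMem (by simp [hdne])]
      simp
    · rw [if_pos hb1, if_neg hb2, if_pos ⟨hdvd, hb1⟩,
        if_neg (fun hq => hb2 ⟨hq.2.1, hq.2.2⟩)]
      simp
    · rw [if_neg hb1, if_pos hb2, if_neg (fun hq => hb1 hq.2), if_pos ⟨hdvd, hb2.1, hb2.2⟩]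
      simp
    · rw [if_neg hb1, if_neg hb2, if_neg (fun hq => hb1 hq.2),
        if_neg (fun hq => hb2 ⟨hq.2.1, hq.2.2⟩)]
      simp
  · have hEeq : E = ∅ := by
      rw [Finset.eq_empty_iff_forall_notMem]
      intro y hy
      simp only [hE, Finset.mem_filter, Finset.mem_Icc] at hy
      obtain ⟨⟨hy1, _⟩, hydvd, h1, h2, h3⟩ := hy
      rcases h3 with h3 | h3
      · exact hdvd (h3 ▸ hydvd)
      · obtain ⟨hmul, _⟩ := pvCofactor n y hn hy1 hydvd
        rw [h3] at hmul
        exact hdvd ⟨y, by rw [← hmul]; ring⟩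
    rw [hEeq, if_neg (fun hq => hdvd hq.1), if_neg (fun hq => hdvd hq.1)]
    simp

lemma pvLoopB_eq (n b d c : Int) (hn : 1 ≤ n) (hd : 1 ≤ d) :
    multiplosAltLoop n b d c = c + ((pvR n b d).card : Int) := by
  revert hd
  fun_induction multiplosAltLoop n b d c with
  | case1 d c h ih =>
    intro hd
    simp only [dite_eq_ite] at ih ⊢
    rw [ih (by omega), pvR_step n b d hn hd h]
    have hmod : PySem.Int.mod n d = 0 ↔ d ∣ n := PySem.Int.mod_eq_zero_iff_dvd n d
    have hfd : PySem.Int.floordiv n d = n / d := PySem.Int.floordiv_eq_ediv_of_pos (by omega)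
    by_cases hdvd : d ∣ n
    · rw [if_pos (hmod.mpr hdvd)]
      simp only [hfd]
      by_cases h1 : d ≤ b <;> by_cases h2 : n / d ≠ d ∧ n / d ≤ b <;>
        simp [h1, h2, hdvd] <;> ring
    · have hm : ¬ PySem.Int.mod n d = 0 := fun h0 => hdvd (hmod.mp h0)
      simp [hm, hdvd]
  | case2 d c h =>
    intro hd
    rw [pvR_empty n b d hn hd h]
    simp

lemma pvR_one (n b : Int) (hn : 1 ≤ n) :
    pvR n b 1 = (Finset.Icc 1 b).filter (fun y => y ∣ n) := by
  ext y
  simp only [pvR, Finset.mem_filter, Finset.mem_Icc]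
  constructor
  · rintro ⟨hy, hdvd, _⟩; exact ⟨hy, hdvd⟩
  · rintro ⟨hy, hdvd⟩
    exact ⟨hy, hdvd, hy.1, (pvCofactor n y hn hy.1 hdvd).2⟩

-- ===== VERDICT (by name: the statement is the Claim_ definition above) =====
theorem multiplos_spec : Claim_equal_multiplos := by
  intro a b _
  show multiplos a b = (if b ≤ 0 then 0 else if |a| = 0 then b else multiplosAltLoop |a| b 1 0)
  rw [pvMultiplos_eq]
  split_ifs with hb ha
  · rw [Finset.Icc_eq_empty (by omega)]
    simp
  · have ha0 : a = 0 := by simpa [abs_eq_zero] using ha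
    subst ha0
    have ht : ((Finset.Icc (1:Int) b).filter (fun y => y ∣ (0 : Int))) = Finset.Icc 1 b := by
      apply Finset.filter_true_of_mem
      intro y _
      exact dvd_zero y
    rw [ht, Int.card_Icc]
    omega
  · have hn : 1 ≤ |a| := by
      have := abs_nonneg a
      rcases eq_or_ne (|a|) 0 with h | h
      · exact absurd h ha
      · omega
    rw [pvLoopB_eq |a| b 1 0 hn (by omega), pvR_one |a| b hn]
    have ht : ((Finset.Icc (1:Int) b).filter (fun y => y ∣ a))
        = ((Finset.Icc (1:Int) b).filter (fun y => y ∣ |a|)) := by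
      apply Finset.filter_congr
      intro y _
      simp [dvd_abs]
    rw [ht]
    simp
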